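-- pv_equiv track=rewrite | github.com/codemotozu/Documented_Speak_and_Translate_App | server/app/application/services/tts_service.py | _generate_language_section
-- ===== SOURCE A (Python) =====
-- def _generate_language_section( # Defines method to generate a language-specific section. # Definiert Methode zur Generierung eines sprachspezifischen Abschnitts.
--     sentence: str, word_pairs: list[tuple[str, str]], voice: str, lang: str # Parameters for sentence, word pairs, voice and language. # Parameter für Satz, Wortpaare, Stimme und Sprache.
-- ) -> str: # Returns SSML string section. # Gibt SSML-Zeichenkettenabschnitt zurück.
--     """Generate complete language section with phrase handling"""
--     section = f"""
--     <voice name="{voice}">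
--         <prosody rate="1.0">
--             <lang xml:lang="{lang}">{sentence}</lang>
--             <break time="1000ms"/>
--         </prosody>
--     </voice>""" # Creates section for full sentence with specified voice and language. # Erstellt Abschnitt für vollständigen Satz mit angegebener Stimme und Sprache.
--
--     if word_pairs: # Checks if word pairs are provided. # Prüft, ob Wortpaare bereitgestellt werden.
--         section += """
--     <voice name="en-US-JennyMultilingualNeural">
--         <prosody rate="0.8">""" # Starts word-by-word breakdown section with slower speech rate. # Startet Wort-für-Wort-Aufschlüsselungsabschnitt mit langsamerer Sprechrate.
--
--         # Create phrase map and sort by phrase length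
--         phrase_map = {src.lower(): (src, tgt) for src, tgt in word_pairs} # Creates mapping of lowercase source to original pairs. # Erstellt Zuordnung von Kleinbuchstaben-Quelle zu Original-Paaren.
--         phrases = sorted( # Sorts phrases by length (longest first). # Sortiert Phrasen nach Länge (längste zuerst).
--             phrase_map.keys(), key=lambda x: len(x.split()), reverse=True # Sort key is word count in descending order. # Sortierschlüssel ist Wortzahl in absteigender Reihenfolge.
--         )
--         words = sentence.split() # Splits sentence into words. # Teilt Satz in Wörter.
--         index = 0 # Initializes word index. # Initialisiert Wortindex.
--
--         while index < len(words): # Loops through all words in sentence. # Schleife durch alle Wörter im Satz.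
--             matched = False # Tracks if current position matched a phrase. # Verfolgt, ob aktuelle Position einer Phrase entspricht.
--
--             # Try to match multi-word phrases first
--             for phrase_key in phrases: # Checks each potential phrase. # Prüft jede potenzielle Phrase.
--                 phrase_words = phrase_key.split() # Splits phrase into words. # Teilt Phrase in Wörter.
--                 if index + len(phrase_words) > len(words): # Checks if phrase would extend beyond sentence end. # Prüft, ob Phrase über Satzende hinausgehen würde.
--                     continue # Skips to next phrase. # Springt zur nächsten Phrase.
--
--                 candidate = " ".join( # Constructs candidate phrase from sentence words. # Konstruiert Kandidatenphrase aus Satzwörtern.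
--                     words[index : index + len(phrase_words)] # Takes slice of words. # Nimmt Ausschnitt von Wörtern.
--                 ).lower() # Converts to lowercase for comparison. # Konvertiert für Vergleich in Kleinbuchstaben.
--                 if candidate == phrase_key: # Checks if candidate matches known phrase. # Prüft, ob Kandidat mit bekannter Phrase übereinstimmt.
--                     original_phrase, translation = phrase_map[phrase_key] # Gets original phrase and translation. # Holt Originalphrase und Übersetzung.
--                     section += f"""
--         <lang xml:lang="{lang}">{original_phrase}</lang>
--         <break time="300ms"/>
--         <lang xml:lang="es-ES">{translation}</lang>
--         <break time="500ms"/>""" # Adds phrase with its translation to SSML. # Fügt Phrase mit ihrer Übersetzung zum SSML hinzu.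
--                     index += len(phrase_words) # Advances index past this phrase. # Verschiebt Index über diese Phrase hinaus.
--                     matched = True # Marks as matched. # Markiert als übereinstimmend.
--                     break # Exits phrase search loop. # Beendet Phrasen-Suchschleife.
--
--             # Single word fallback
--             if not matched: # If no phrase matched at current position. # Wenn keine Phrase an aktueller Position übereinstimmt.
--                 word = words[index].strip(".,!?") # Gets current word without punctuation. # Holt aktuelles Wort ohne Interpunktion.
--                 translation = next( # Finds matching translation for this word. # Findet passende Übersetzung für dieses Wort.
--                     (tgt for src, tgt in word_pairs if src.lower() == word.lower()), # Searches case-insensitively. # Sucht unabhängig von Groß-/Kleinschreibung.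
--                     None, # Default to None if no match found. # Standardmäßig None, wenn keine Übereinstimmung gefunden.
--                 )
--                 section += f"""
--         <lang xml:lang="{lang}">{word}</lang>
--         <break time="300ms"/>""" # Adds word to SSML. # Fügt Wort zum SSML hinzu.
--                 if translation: # If translation was found. # Wenn Übersetzung gefunden wurde.
--                     section += f"""
--         <lang xml:lang="es-ES">{translation}</lang>
--         <break time="500ms"/>""" # Adds translation to SSML. # Fügt Übersetzung zum SSML hinzu.
--                 else: # If no translation was found. # Wenn keine Übersetzung gefunden wurde.
--                     section += """<break time="500ms"/>""" # Adds pause only. # Fügt nur Pause hinzu.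
--                 index += 1 # Advances to next word. # Verschiebt zu nächstem Wort.
--
--         section += """
--         <break time="1000ms"/>
--         </prosody>
--     </voice>""" # Closes word-by-word section. # Schließt Wort-für-Wort-Abschnitt.
--
--     return section # Returns the complete section. # Gibt den vollständigen Abschnitt zurück.
-- ===== SOURCE B (Python) =====
-- # B: instead of scanning the full sorted phrase list at every word position, group the
-- # lowercased phrase keys by word-count into sets and probe only the distinct word-counts
-- # (longest first) with an O(1) set-membership test; single-word fallback uses a dict
-- # built once (first occurrence per lowercased source) instead of rescanning word_pairs.
-- def _generate_language_section(sentence, word_pairs, voice, lang):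
--     parts = [f"""
--     <voice name="{voice}">
--         <prosody rate="1.0">
--             <lang xml:lang="{lang}">{sentence}</lang>
--             <break time="1000ms"/>
--         </prosody>
--     </voice>"""]
--     if word_pairs:
--         parts.append("""
--     <voice name="en-US-JennyMultilingualNeural">
--         <prosody rate="0.8">""")
--         phrase_map = {}
--         word_map = {}
--         for src, tgt in word_pairs:
--             phrase_map[src.lower()] = (src, tgt)
--             word_map.setdefault(src.lower(), tgt)
--         by_len = {}
--         for key in phrase_map:
--             n = len(key.split())
--             if n > 0:
--                 by_len.setdefault(n, set()).add(key)
--         lengths = sorted(by_len, reverse=True)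
--         words = sentence.split()
--         index = 0
--         while index < len(words):
--             for length in lengths:
--                 if index + length <= len(words):
--                     candidate = " ".join(words[index:index + length]).lower()
--                     if candidate in by_len[length]:
--                         original_phrase, translation = phrase_map[candidate]
--                         parts.append(f"""
--         <lang xml:lang="{lang}">{original_phrase}</lang>
--         <break time="300ms"/>
--         <lang xml:lang="es-ES">{translation}</lang>
--         <break time="500ms"/>""")
--                         index += length
--                         break
--             else:
--                 word = words[index].strip(".,!?")
--                 translation = word_map.get(word.lower())
--                 parts.append(f"""
--         <lang xml:lang="{lang}">{word}</lang>
--         <break time="300ms"/>""")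
--                 if translation:
--                     parts.append(f"""
--         <lang xml:lang="es-ES">{translation}</lang>
--         <break time="500ms"/>""")
--                 else:
--                     parts.append("""<break time="500ms"/>""")
--                 index += 1
--         parts.append("""
--         <break time="1000ms"/>
--         </prosody>
--     </voice>""")
--     return "".join(parts)
-- ===== Notes on version B (the rewrite author's own statement) =====
-- stated objective: faster
-- what changed: Instead of rescanning the whole length-sorted phrase list at every word position (and linearly rescanning word_pairs for every single-word fallback), B groups the lowercased phrase keys by word-count into sets once and probes only the distinct word-counts longest-first with set membership, with a dict built once for the single-word fallback; Pre_ excludes word_pairs containing an empty-string source, on which A's matcher can match the empty phrase without advancing and loop forever.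
import Mathlib
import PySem

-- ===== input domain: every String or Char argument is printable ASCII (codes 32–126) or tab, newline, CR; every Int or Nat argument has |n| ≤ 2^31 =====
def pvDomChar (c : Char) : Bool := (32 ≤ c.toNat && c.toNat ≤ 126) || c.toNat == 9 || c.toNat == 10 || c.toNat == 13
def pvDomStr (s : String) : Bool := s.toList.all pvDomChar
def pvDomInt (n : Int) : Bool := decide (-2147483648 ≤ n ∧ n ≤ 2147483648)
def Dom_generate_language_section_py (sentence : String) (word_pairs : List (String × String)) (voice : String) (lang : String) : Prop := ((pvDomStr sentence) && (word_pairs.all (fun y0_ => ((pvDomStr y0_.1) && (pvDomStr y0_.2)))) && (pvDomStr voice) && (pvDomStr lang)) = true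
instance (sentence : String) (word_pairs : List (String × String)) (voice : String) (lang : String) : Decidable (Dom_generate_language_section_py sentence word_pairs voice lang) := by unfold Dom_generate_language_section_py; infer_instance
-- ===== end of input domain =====

-- B groups the lowercased phrase keys by word-count into sets probed longest-length-first
-- (and a dict for the single-word fallback) instead of rescanning the whole sorted phrase
-- list (and word_pairs) at every word position.  Equivalence of the RETURN value is proved
-- on inputs whose sources are non-empty strings (Pre_).

-- shared literal pieces: both Pythons emit the identical f-string fragments
def pvHeader (sentence voice lang : String) : String :=
  "\n    <voice name=\"" ++ voice ++ "\">\n        <prosody rate=\"1.0\">\n            <lang xml:lang=\"" ++ lang ++ "\">" ++ sentence ++ "</lang>\n            <break time=\"1000ms\"/>\n        </prosody>\n    </voice>"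
def pvOpen : String := "\n    <voice name=\"en-US-JennyMultilingualNeural\">\n        <prosody rate=\"0.8\">"
def pvPhrasePiece (lang orig tr : String) : String :=
  "\n        <lang xml:lang=\"" ++ lang ++ "\">" ++ orig ++ "</lang>\n        <break time=\"300ms\"/>\n        <lang xml:lang=\"es-ES\">" ++ tr ++ "</lang>\n        <break time=\"500ms\"/>"
def pvWordPiece (lang w : String) : String :=
  "\n        <lang xml:lang=\"" ++ lang ++ "\">" ++ w ++ "</lang>\n        <break time=\"300ms\"/>"
def pvTransPiece (tr : String) : String :=
  "\n        <lang xml:lang=\"es-ES\">" ++ tr ++ "</lang>\n        <break time=\"500ms\"/>"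
def pvBreak500 : String := "<break time=\"500ms\"/>"
def pvClose : String := "\n        <break time=\"1000ms\"/>\n        </prosody>\n    </voice>"

-- len(k.split()) and " ".join(words[index:index+L]).lower() — computed identically by both Pythons
def pvWc (k : String) : Nat := (PySem.Str.split₀ k).length
def pvCand (words : List String) (index L : Nat) : String :=
  PySem.Str.lower (PySem.Str.join " " (PySem.List.slice words (some (index : Int)) (some ((index : Int) + (L : Int)))))

-- ===== PORT A =====
-- A's while loop (fuel = words.length: inside Pre_ every iteration advances index by ≥ 1)
def pvLoopA (word_pairs : List (String × String)) (lang : String)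
    (phrases : List String) (pm : PySem.Dict String (String × String)) (words : List String) :
    Nat → Nat → String → String
  | 0, _, acc => acc
  | fuel + 1, index, acc =>
    if index < words.length then
      match phrases.find? (fun pk =>
          decide (index + pvWc pk ≤ words.length) && (pvCand words index (pvWc pk) == pk)) with
      | some pk =>
          let p := pm.getD pk ("", "")
          pvLoopA word_pairs lang phrases pm words fuel (index + pvWc pk)
            (acc ++ pvPhrasePiece lang p.1 p.2)
      | none =>
          let word := PySem.Str.stripChars (words.getD index "") ".,!?"
          let translation := (word_pairs.find? (fun p => PySem.Str.lower p.1 == PySem.Str.lower word)).map (·.2)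
          let acc1 := acc ++ pvWordPiece lang word
          let acc2 := match translation with
            | some t => if t == "" then acc1 ++ pvBreak500 else acc1 ++ pvTransPiece t
            | none => acc1 ++ pvBreak500
          pvLoopA word_pairs lang phrases pm words fuel (index + 1) acc2
    else acc

def generate_language_section_py (sentence : String) (word_pairs : List (String × String)) (voice : String) (lang : String) : String :=
  let section0 := pvHeader sentence voice lang
  if word_pairs.isEmpty then section0
  else
    let section1 := section0 ++ pvOpen
    let pm := word_pairs.foldl (fun d p => d.insert (PySem.Str.lower p.1) (p.1, p.2)) PySem.Dict.empty
    let phrases := PySem.List.sorted pm.keys (fun k => pvWc k) true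
    let words := PySem.Str.split₀ sentence
    pvLoopA word_pairs lang phrases pm words words.length 0 section1 ++ pvClose

-- ===== PORT B =====
-- B's while loop over parts; inner for/else over the distinct word-counts (desc)
def pvLoopB (lang : String) (lengths : List Nat) (byLen : PySem.Dict Nat (PySem.Set String))
    (pm : PySem.Dict String (String × String)) (wm : PySem.Dict String String) (words : List String) :
    Nat → Nat → List String → List String
  | 0, _, parts => parts
  | fuel + 1, index, parts =>
    if index < words.length then
      match lengths.find? (fun L =>
          decide (index + L ≤ words.length) && PySem.Set.contains (byLen.getD L []) (pvCand words index L)) with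
      | some L =>
          let p := pm.getD (pvCand words index L) ("", "")
          pvLoopB lang lengths byLen pm wm words fuel (index + L)
            (parts ++ [pvPhrasePiece lang p.1 p.2])
      | none =>
          let word := PySem.Str.stripChars (words.getD index "") ".,!?"
          let translation := wm.get? (PySem.Str.lower word)
          let parts1 := parts ++ [pvWordPiece lang word]
          let parts2 := match translation with
            | some t => if t == "" then parts1 ++ [pvBreak500] else parts1 ++ [pvTransPiece t]
            | none => parts1 ++ [pvBreak500]
          pvLoopB lang lengths byLen pm wm words fuel (index + 1) parts2
    else parts

def generate_language_section_py_alt (sentence : String) (word_pairs : List (String × String)) (voice : String) (lang : String) : String :=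
  let parts0 := [pvHeader sentence voice lang]
  if word_pairs.isEmpty then PySem.Str.join "" parts0
  else
    let parts1 := parts0 ++ [pvOpen]
    let st := word_pairs.foldl
      (fun (s : PySem.Dict String (String × String) × PySem.Dict String String) p =>
        (s.1.insert (PySem.Str.lower p.1) (p.1, p.2), s.2.setdefault (PySem.Str.lower p.1) p.2))
      (PySem.Dict.empty, PySem.Dict.empty)
    let byLen := st.1.keys.foldl
      (fun d k => if 0 < pvWc k then d.modify (pvWc k) [] (fun s => PySem.Set.add s k) else d)
      PySem.Dict.empty
    let lengths := PySem.List.sorted byLen.keys (fun n => n) true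
    let words := PySem.Str.split₀ sentence
    PySem.Str.join "" (pvLoopB lang lengths byLen st.1 st.2 words words.length 0 parts1 ++ [pvClose])

-- ===== PRECONDITION & SPEC =====
-- Pre_ excludes word_pairs containing an empty-string source: its lowercased key is the
-- empty phrase, which A's matcher can match without advancing, so A loops forever on most
-- such inputs (e.g. ("q", [("", "y")], "v", "l")) while B always terminates.
def Pre_generate_language_section_py (sentence : String) (word_pairs : List (String × String)) (voice : String) (lang : String) : Prop :=
  ∀ p ∈ word_pairs, p.1 ≠ ""
instance (sentence : String) (word_pairs : List (String × String)) (voice : String) (lang : String) : Decidable (Pre_generate_language_section_py sentence word_pairs voice lang) := by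
  unfold Pre_generate_language_section_py; infer_instance

def pvWitness_generate_language_section_py : String × (List (String × String)) × String × String :=
  ("Hola mundo feliz", [("Hola mundo", "hello world"), ("feliz", "happy")], "es-ES-AlvaroNeural", "es-ES")

def Spec_generate_language_section_py (sentence : String) (word_pairs : List (String × String)) (voice : String) (lang : String) (out : String) : Prop := out = generate_language_section_py_alt sentence word_pairs voice lang
instance (sentence : String) (word_pairs : List (String × String)) (voice : String) (lang : String) (out : String) : Decidable (Spec_generate_language_section_py sentence word_pairs voice lang out) := by unfold Spec_generate_language_section_py; infer_instance

-- ===== CLAIM (what is proved, stated in full; the proofs are below) =====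
def Claim_equal_generate_language_section_py : Prop := ∀ (sentence : String) (word_pairs : List (String × String)) (voice : String) (lang : String), Dom_generate_language_section_py sentence word_pairs voice lang → Pre_generate_language_section_py sentence word_pairs voice lang → Spec_generate_language_section_py sentence word_pairs voice lang (generate_language_section_py sentence word_pairs voice lang)

-- ===== LEMMAS AND PROOFS =====

-- "".join concatenates (Chars level)
lemma pvChJoinNil (ps : List (List Char)) (p : List Char) :
    PySem.Chars.join [] (ps ++ [p]) = PySem.Chars.join [] ps ++ p := by
  induction ps with
  | nil => simp [PySem.Chars.join_nil, PySem.Chars.join_singleton]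
  | cons q t ih =>
    cases t with
    | nil => simp [PySem.Chars.join_singleton, PySem.Chars.join_cons_cons, PySem.Chars.join_nil]
    | cons r t' =>
      rw [List.cons_append, PySem.Chars.join_cons_cons, List.cons_append,
        PySem.Chars.join_cons_cons]
      simp only [List.append_nil]
      rw [List.cons_append] at ih
      rw [ih, List.append_assoc]

lemma pvStrExt (s t : String) (h : s.toList = t.toList) : s = t := String.toList_inj.mp h

lemma pvJoinNil (ps : List String) (p : String) :
    PySem.Str.join "" (ps ++ [p]) = PySem.Str.join "" ps ++ p := by
  apply pvStrExt
  simp [PySem.Str.toList_join, pvChJoinNil]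

lemma pvJoinSingleton (p : String) : PySem.Str.join "" [p] = p := by
  apply pvStrExt
  simp [PySem.Str.toList_join, PySem.Chars.join_singleton]

-- an empty lowercased key comes only from an empty source
lemma pvLowerEmpty (s : String) (h : PySem.Str.lower s = "") : s = "" := by
  have := congrArg String.toList h
  simp [PySem.Str.toList_lower, PySem.Chars.lower] at this
  cases s; simp_all

-- the zero-length candidate slice is ""
lemma pvCandZero (words : List String) (index : Nat) : pvCand words index 0 = "" := by
  unfold pvCand
  rw [PySem.List.slice_natCast_add words index 0]
  apply pvStrExt
  simp [PySem.Str.toList_lower, PySem.Str.toList_join, PySem.Chars.join_nil, PySem.Chars.lower]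

-- find? on a list sorted descending by weight returns the (unique) match of maximal weight
lemma pvFindDesc {α : Type} (S : List α) (w : α → Nat) (f : α → Bool)
    (hpair : S.Pairwise (fun a b => w b ≤ w a))
    (huniq : ∀ a ∈ S, ∀ b ∈ S, f a = true → f b = true → w a = w b → a = b) (x : α) :
    S.find? f = some x ↔ x ∈ S ∧ f x = true ∧ ∀ b ∈ S, f b = true → w b ≤ w x := by
  induction S with
  | nil => simp
  | cons h0 t ih =>
    rw [List.pairwise_cons] at hpair
    obtain ⟨hle, hpt⟩ := hpair
    by_cases hf : f h0 = true
    · rw [List.find?_cons_of_pos (h := hf)]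
      constructor
      · rintro h
        injection h with h; subst h
        refine ⟨List.mem_cons_self, hf, ?_⟩
        intro b hb _
        rcases List.mem_cons.mp hb with rfl | hb
        · exact le_refl _
        · exact hle b hb
      · rintro ⟨hx, hfx, hmax⟩
        rcases List.mem_cons.mp hx with rfl | hx
        · rfl
        · have h1 : w x ≤ w h0 := hle x hx
          have h2 : w h0 ≤ w x := hmax h0 List.mem_cons_self hf
          have := huniq x (List.mem_cons_of_mem _ hx) h0 List.mem_cons_self hfx hf (le_antisymm h1 h2)
          rw [this]
    · rw [List.find?_cons_of_neg (h := hf)]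
      rw [ih hpt (fun a ha b hb => huniq a (List.mem_cons_of_mem _ ha) b (List.mem_cons_of_mem _ hb))]
      constructor
      · rintro ⟨hx, hfx, hmax⟩
        refine ⟨List.mem_cons_of_mem _ hx, hfx, ?_⟩
        intro b hb hfb
        rcases List.mem_cons.mp hb with rfl | hb
        · exact absurd hfb hf
        · exact hmax b hb hfb
      · rintro ⟨hx, hfx, hmax⟩
        rcases List.mem_cons.mp hx with rfl | hx
        · exact absurd hfx hf
        · exact ⟨hx, hfx, fun b hb hfb => hmax b (List.mem_cons_of_mem _ hb) hfb⟩

-- contents of the by_len groups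
lemma pvGroup (l : List String) (d : PySem.Dict Nat (PySem.Set String)) (L : Nat) (y : String) :
    y ∈ (l.foldl (fun d k => d.modify (pvWc k) [] (fun s => PySem.Set.add s k)) d).getD L [] ↔
      y ∈ d.getD L [] ∨ (y ∈ l ∧ pvWc y = L) := by
  induction l generalizing d with
  | nil => simp
  | cons k t ih =>
    rw [List.foldl_cons, ih]
    rw [PySem.Dict.getD_modify]
    constructor
    · rintro (h | ⟨ht, hw⟩)
      · split_ifs at h with hL
        · rcases (PySem.Set.mem_add _ _ _).mp h with h | rfl
          · exact Or.inl (by rw [hL]; exact h)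
          · exact Or.inr ⟨List.mem_cons_self, hL.symm⟩
        · exact Or.inl h
      · exact Or.inr ⟨List.mem_cons_of_mem _ ht, hw⟩
    · rintro (h | ⟨hm, hw⟩)
      · left
        split_ifs with hL
        · exact (PySem.Set.mem_add _ _ _).mpr (Or.inl (by rw [← hL]; exact h))
        · exact h
      · rcases List.mem_cons.mp hm with rfl | ht
        · left
          rw [if_pos hw.symm]
          exact (PySem.Set.mem_add _ _ _).mpr (Or.inr rfl)
        · exact Or.inr ⟨ht, hw⟩

-- the single-word fallback: first-match scan of word_pairs = lookup in the setdefault dict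
lemma pvWmLookup (l : List (String × String)) (d : PySem.Dict String String) (w : String) :
    (l.foldl (fun d p => d.setdefault (PySem.Str.lower p.1) p.2) d).get? w =
      (d.get? w).or ((l.find? (fun p => PySem.Str.lower p.1 == w)).map (·.2)) := by
  induction l generalizing d with
  | nil => simp
  | cons p t ih =>
    rw [List.foldl_cons, ih]
    by_cases hw : PySem.Str.lower p.1 = w
    · rw [List.find?_cons_of_pos (h := by simp [hw])]
      rw [← hw, PySem.Dict.get?_setdefault_self]
      cases h : d.get? (PySem.Str.lower p.1) <;> simp
    · rw [List.find?_cons_of_neg (h := by simp [hw])]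
      rw [PySem.Dict.get?_setdefault_of_ne (hne := fun h => hw h.symm)]

-- the core step equivalence: A's scan of the sorted phrase list and B's scan of the
-- descending distinct word-counts find the same phrase (or both find none)
lemma pvStep (K : List String) (hne : ∀ k ∈ K, k ≠ "") (words : List String) (index : Nat) :
    ((PySem.List.sorted K pvWc true).find? (fun pk =>
        decide (index + pvWc pk ≤ words.length) && (pvCand words index (pvWc pk) == pk)) = none ∧
      (PySem.List.sorted
          (PySem.Dict.keys (K.foldl (fun d k => if 0 < pvWc k then d.modify (pvWc k) [] (fun s => PySem.Set.add s k) else d) PySem.Dict.empty))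
          (fun n => n) true).find? (fun L =>
        decide (index + L ≤ words.length) &&
          PySem.Set.contains ((K.foldl (fun d k => if 0 < pvWc k then d.modify (pvWc k) [] (fun s => PySem.Set.add s k) else d) PySem.Dict.empty).getD L []) (pvCand words index L)) = none) ∨
    (∃ L, (PySem.List.sorted
          (PySem.Dict.keys (K.foldl (fun d k => if 0 < pvWc k then d.modify (pvWc k) [] (fun s => PySem.Set.add s k) else d) PySem.Dict.empty))
          (fun n => n) true).find? (fun L =>
        decide (index + L ≤ words.length) &&
          PySem.Set.contains ((K.foldl (fun d k => if 0 < pvWc k then d.modify (pvWc k) [] (fun s => PySem.Set.add s k) else d) PySem.Dict.empty).getD L []) (pvCand words index L)) = some L ∧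
      (PySem.List.sorted K pvWc true).find? (fun pk =>
        decide (index + pvWc pk ≤ words.length) && (pvCand words index (pvWc pk) == pk)) = some (pvCand words index L) ∧
      pvWc (pvCand words index L) = L) := by
  set byLen := K.foldl (fun d k => if 0 < pvWc k then d.modify (pvWc k) [] (fun s => PySem.Set.add s k) else d) PySem.Dict.empty with hbyLen
  set fA := (fun pk => decide (index + pvWc pk ≤ words.length) && (pvCand words index (pvWc pk) == pk)) with hfA
  set fB := (fun L => decide (index + L ≤ words.length) && PySem.Set.contains (byLen.getD L []) (pvCand words index L)) with hfB
  have hfold : byLen = (K.filter (fun k => decide (0 < pvWc k))).foldl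
      (fun d k => d.modify (pvWc k) [] (fun s => PySem.Set.add s k)) PySem.Dict.empty := by
    rw [hbyLen, PySem.List.foldl_ite_eq_foldl_filter (p := fun k => 0 < pvWc k)]
  have hgroup : ∀ L y, y ∈ byLen.getD L [] ↔ (y ∈ K ∧ 0 < pvWc y ∧ pvWc y = L) := by
    intro L y
    rw [hfold, pvGroup]
    simp [List.mem_filter, PySem.Dict.getD_empty]
    tauto
  have hkeys : ∀ L, L ∈ byLen.keys ↔ ∃ k ∈ K, 0 < pvWc k ∧ pvWc k = L := by
    intro L
    rw [hfold, PySem.Dict.keys_foldl_modify_key _ (fun k => pvWc k) [] (fun _ k s => PySem.Set.add s k)]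
    rw [PySem.Dict.keys_empty, PySem.Set.update_nil_left]
    rw [PySem.Set.mem_ofList]
    simp [List.mem_map, List.mem_filter]
    tauto
  have hfB' : ∀ L, fB L = true ↔
      (index + L ≤ words.length ∧ pvCand words index L ∈ K ∧ 0 < pvWc (pvCand words index L) ∧ pvWc (pvCand words index L) = L) := by
    intro L
    rw [hfB]
    simp only [Bool.and_eq_true, decide_eq_true_eq, PySem.Set.contains_iff]
    rw [hgroup]
  have hfA' : ∀ a, fA a = true ↔ (index + pvWc a ≤ words.length ∧ pvCand words index (pvWc a) = a) := by
    intro a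
    rw [hfA]
    simp only [Bool.and_eq_true, decide_eq_true_eq, beq_iff_eq]
  have hpos : ∀ a ∈ K, fA a = true → 0 < pvWc a := by
    intro a ha hfa
    rcases (hfA' a).mp hfa with ⟨_, hc⟩
    by_contra hz
    push_neg at hz
    interval_cases h : pvWc a
    · rw [pvCandZero] at hc
      exact hne a ha hc.symm
  have hSmem : ∀ a, a ∈ PySem.List.sorted K pvWc true ↔ a ∈ K := fun a =>
    (PySem.List.sorted_perm K pvWc true).mem_iff
  have hSpair : (PySem.List.sorted K pvWc true).Pairwise (fun a b => pvWc b ≤ pvWc a) :=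
    PySem.List.sorted_pairwise_rev K pvWc
  have hSuniq : ∀ a ∈ PySem.List.sorted K pvWc true, ∀ b ∈ PySem.List.sorted K pvWc true,
      fA a = true → fA b = true → pvWc a = pvWc b → a = b := by
    intro a _ b _ hfa hfb hw
    rcases (hfA' a).mp hfa with ⟨_, ha⟩
    rcases (hfA' b).mp hfb with ⟨_, hb⟩
    rw [← ha, ← hb, hw]
  have hLmem : ∀ L, L ∈ PySem.List.sorted byLen.keys (fun n => n) true ↔ L ∈ byLen.keys := fun L =>
    (PySem.List.sorted_perm byLen.keys (fun n => n) true).mem_iff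
  have hLpair : (PySem.List.sorted byLen.keys (fun n => n) true).Pairwise (fun a b => b ≤ a) :=
    PySem.List.sorted_pairwise_rev byLen.keys (fun n => n)
  cases hB : (PySem.List.sorted byLen.keys (fun n => n) true).find? fB with
  | none =>
    left
    refine ⟨?_, rfl⟩
    rw [List.find?_eq_none] at hB ⊢
    intro a haS
    intro hfa
    have haK := (hSmem a).mp haS
    have hp := hpos a haK hfa
    rcases (hfA' a).mp hfa with ⟨hfit, hc⟩
    have hLin : pvWc a ∈ byLen.keys := (hkeys _).mpr ⟨a, haK, hp, rfl⟩
    have : fB (pvWc a) = true := (hfB' _).mpr ⟨hfit, by rw [hc]; exact haK, by rw [hc]; exact hp, by rw [hc]⟩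
    exact (hB _ ((hLmem _).mpr hLin)) this
  | some L =>
    right
    refine ⟨L, rfl, ?_, ?_⟩
    · have hchar := (pvFindDesc (PySem.List.sorted byLen.keys (fun n => n) true) (fun n => n) fB hLpair
        (by intro a _ b _ _ _ h; exact h) L).mp hB
      obtain ⟨hLS, hfBL, hmaxL⟩ := hchar
      rcases (hfB' L).mp hfBL with ⟨hfit, hcK, hcpos, hcw⟩
      rw [pvFindDesc _ pvWc fA hSpair hSuniq]
      refine ⟨(hSmem _).mpr hcK, (hfA' _).mpr ⟨by rw [hcw]; exact hfit, by rw [hcw]⟩, ?_⟩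
      intro b hbS hfb
      have hbK := (hSmem b).mp hbS
      have hbp := hpos b hbK hfb
      rcases (hfA' b).mp hfb with ⟨hbfit, hbc⟩
      have hbLin : pvWc b ∈ byLen.keys := (hkeys _).mpr ⟨b, hbK, hbp, rfl⟩
      have hbfB : fB (pvWc b) = true := (hfB' _).mpr ⟨hbfit, by rw [hbc]; exact hbK, by rw [hbc]; exact hbp, by rw [hbc]⟩
      have := hmaxL (pvWc b) ((hLmem _).mpr hbLin) hbfB
      simpa [hcw] using this
    · have hchar := (pvFindDesc (PySem.List.sorted byLen.keys (fun n => n) true) (fun n => n) fB hLpair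
        (by intro a _ b _ _ _ h; exact h) L).mp hB
      rcases (hfB' L).mp hchar.2.1 with ⟨_, _, _, hcw⟩
      exact hcw

-- the two while loops agree (A's string accumulator = "".join of B's parts list)
lemma pvLoopsEq (word_pairs : List (String × String)) (lang : String)
    (pm : PySem.Dict String (String × String)) (wm : PySem.Dict String String)
    (byLen : PySem.Dict Nat (PySem.Set String)) (phrases : List String) (lengths : List Nat)
    (words : List String)
    (hwm : ∀ w, wm.get? w = (word_pairs.find? (fun p => PySem.Str.lower p.1 == w)).map (·.2))
    (hstep : ∀ index,
      (phrases.find? (fun pk =>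
          decide (index + pvWc pk ≤ words.length) && (pvCand words index (pvWc pk) == pk)) = none ∧
        lengths.find? (fun L =>
          decide (index + L ≤ words.length) && PySem.Set.contains (byLen.getD L []) (pvCand words index L)) = none) ∨
      (∃ L, lengths.find? (fun L =>
          decide (index + L ≤ words.length) && PySem.Set.contains (byLen.getD L []) (pvCand words index L)) = some L ∧
        phrases.find? (fun pk =>
          decide (index + pvWc pk ≤ words.length) && (pvCand words index (pvWc pk) == pk)) = some (pvCand words index L) ∧
        pvWc (pvCand words index L) = L)) :
    ∀ (fuel index : Nat) (parts : List String),
      pvLoopA word_pairs lang phrases pm words fuel index (PySem.Str.join "" parts) =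
        PySem.Str.join "" (pvLoopB lang lengths byLen pm wm words fuel index parts) := by
  intro fuel
  induction fuel with
  | zero => intro index parts; rfl
  | succ n ih =>
    intro index parts
    rw [pvLoopA, pvLoopB]
    by_cases hidx : index < words.length
    · rw [if_pos hidx, if_pos hidx]
      rcases hstep index with ⟨hA, hB⟩ | ⟨L, hB, hA, hw⟩
      · rw [hA, hB]
        simp only
        rw [hwm (PySem.Str.lower (PySem.Str.stripChars (words.getD index "") ".,!?"))]
        cases htr : (word_pairs.find? (fun p => PySem.Str.lower p.1 == PySem.Str.lower (PySem.Str.stripChars (words.getD index "") ".,!?"))).map (·.2) with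
        | none =>
          dsimp only
          rw [← pvJoinNil, ← pvJoinNil, ih]
        | some t =>
          dsimp only
          by_cases ht : (t == "") = true
          · rw [if_pos ht, if_pos ht, ← pvJoinNil, ← pvJoinNil, ih]
          · rw [if_neg ht, if_neg ht, ← pvJoinNil, ← pvJoinNil, ih]
      · rw [hA, hB]
        simp only
        rw [hw, ← pvJoinNil, ih]
    · rw [if_neg hidx, if_neg hidx]

-- ===== VERDICT (by name: the statement is the Claim_ definition above) =====
theorem generate_language_section_py_spec : Claim_equal_generate_language_section_py := by
  intro sentence word_pairs voice lang _ hpre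
  unfold Spec_generate_language_section_py
  unfold generate_language_section_py generate_language_section_py_alt
  by_cases hemp : word_pairs.isEmpty
  · rw [if_pos hemp, if_pos hemp, pvJoinSingleton]
  · rw [if_neg hemp, if_neg hemp]
    dsimp only
    rw [PySem.List.foldl_prod_mk
      (f := fun (d : PySem.Dict String (String × String)) (p : String × String) => PySem.Dict.insert d (PySem.Str.lower p.1) (p.1, p.2))
      (g := fun (d : PySem.Dict String String) (p : String × String) => PySem.Dict.setdefault d (PySem.Str.lower p.1) p.2)]
    dsimp only
    set pm := word_pairs.foldl (fun d p => PySem.Dict.insert d (PySem.Str.lower p.1) (p.1, p.2)) PySem.Dict.empty with hpm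
    set wmf := word_pairs.foldl (fun d p => PySem.Dict.setdefault d (PySem.Str.lower p.1) p.2) PySem.Dict.empty with hwmf
    have hne : ∀ k ∈ pm.keys, k ≠ "" := by
      intro k hk
      rw [hpm, PySem.Dict.keys_foldl_insert_key word_pairs (fun (p : String × String) => PySem.Str.lower p.1) (fun _ p => (p.1, p.2)) PySem.Dict.empty] at hk
      rw [PySem.Dict.keys_empty, PySem.Set.update_nil_left, PySem.Set.mem_ofList] at hk
      rcases List.mem_map.mp hk with ⟨p, hp, rfl⟩
      intro h
      exact hpre p hp (pvLowerEmpty _ h)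
    have hwm : ∀ w, wmf.get? w = (word_pairs.find? (fun p => PySem.Str.lower p.1 == w)).map (·.2) := by
      intro w
      rw [hwmf, pvWmLookup, PySem.Dict.get?_empty, Option.none_or]
    have hstep := pvStep pm.keys hne (PySem.Str.split₀ sentence)
    have hloops := pvLoopsEq word_pairs lang pm wmf
      (pm.keys.foldl (fun d k => if 0 < pvWc k then d.modify (pvWc k) [] (fun s => PySem.Set.add s k) else d) PySem.Dict.empty)
      (PySem.List.sorted pm.keys (fun k => pvWc k) true)
      (PySem.List.sorted
        (PySem.Dict.keys (pm.keys.foldl (fun d k => if 0 < pvWc k then d.modify (pvWc k) [] (fun s => PySem.Set.add s k) else d) PySem.Dict.empty))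
        (fun n => n) true)
      (PySem.Str.split₀ sentence) hwm hstep
    rw [pvJoinNil]
    rw [← hloops (PySem.Str.split₀ sentence).length 0 ([pvHeader sentence voice lang] ++ [pvOpen])]
    rw [pvJoinNil, pvJoinSingleton]
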